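-- pv_equiv track=rewrite | github.com/corbensorenson/PyTestEmbed | pytestembed/pytestembed/smart_generator.py | _remove_pytestembed_blocks
-- ===== SOURCE A (Python) =====
-- def _remove_pytestembed_blocks(source_code: str) -> str:
--     """Remove PyTestEmbed test: and doc: blocks to make code parseable by AST."""
--     lines = source_code.split('\n')
--     clean_lines = []
--     in_block = False
--     block_indent = 0
--
--     for line in lines:
--         stripped = line.strip()
--
--         # Check if this is a test: or doc: block start
--         if stripped == 'test:' or stripped == 'doc:':
--             in_block = True
--             block_indent = len(line) - len(line.lstrip())
--             # Replace with a comment to maintain line numbers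
--             clean_lines.append(line.replace(stripped, f'# {stripped}'))
--             continue
--
--         if in_block:
--             current_indent = len(line) - len(line.lstrip()) if line.strip() else block_indent + 1
--
--             # If we're still in the block (indented more than block start)
--             if line.strip() == '' or current_indent > block_indent:
--                 # Comment out the line to maintain line numbers
--                 if line.strip():
--                     clean_lines.append('    # ' + line.strip())
--                 else:
--                     clean_lines.append('')
--             else:
--                 # We've exited the block
--                 in_block = False
--                 clean_lines.append(line)
--         else:
--             clean_lines.append(line)
--
--     return '\n'.join(clean_lines)
-- ===== SOURCE B (Python) =====
-- def _is_header(line):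
--     return line.strip() in ('test:', 'doc:')
--
--
-- def _indent(line):
--     return len(line) - len(line.lstrip())
--
--
-- def _body_flags(lines):
--     """flags[i] is True iff line i is a body line of some test:/doc: block."""
--     n = len(lines)
--     flags = [False] * n
--     for h in [i for i in range(n) if _is_header(lines[i])]:
--         ind = _indent(lines[h])
--         j = h + 1
--         while j < n and not _is_header(lines[j]) and (not lines[j].strip() or _indent(lines[j]) > ind):
--             flags[j] = True
--             j += 1
--     return flags
--
--
-- def _remove_pytestembed_blocks(source_code: str) -> str:
--     """Remove PyTestEmbed test: and doc: blocks to make code parseable by AST."""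
--     lines = source_code.split('\n')
--     flags = _body_flags(lines)
--     out = []
--     for line, f in zip(lines, flags):
--         s = line.strip()
--         if s in ('test:', 'doc:'):
--             out.append(line.replace(s, '# ' + s))
--         elif f:
--             out.append('    # ' + s if s else '')
--         else:
--             out.append(line)
--     return '\n'.join(out)
-- ===== Notes on version B (the rewrite author's own statement) =====
-- stated objective: alternative
-- what changed: Replaces A's single-pass in_block/block_indent state machine by two staged passes: a first pass collects the test:/doc: header indices and marks each header's block extent in a boolean flags array, and a second pass renders every line independently from its own text and its flag.
import Mathlib
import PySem

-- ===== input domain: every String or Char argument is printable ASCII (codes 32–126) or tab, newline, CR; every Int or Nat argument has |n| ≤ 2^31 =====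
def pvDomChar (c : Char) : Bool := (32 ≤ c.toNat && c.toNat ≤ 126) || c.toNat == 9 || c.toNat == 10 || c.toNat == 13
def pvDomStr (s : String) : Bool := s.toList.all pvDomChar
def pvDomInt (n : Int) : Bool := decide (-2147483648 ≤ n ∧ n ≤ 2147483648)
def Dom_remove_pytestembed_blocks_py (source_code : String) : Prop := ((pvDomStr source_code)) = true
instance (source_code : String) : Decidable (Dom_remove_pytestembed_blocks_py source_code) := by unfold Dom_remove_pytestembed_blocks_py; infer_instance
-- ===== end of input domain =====

-- B replaces A's single-pass in_block/block_indent state machine by two staged passes: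
-- first mark every block-body line in a boolean flags array (one extent scan per header),
-- then render each line from its text and its flag (objective: alternative decomposition).

-- ===== PORT A =====
-- one iteration of A's `for line in lines` loop; state = (clean_lines, in_block, block_indent)
def pvStepA (st : List String × Bool × Int) (line : String) : List String × Bool × Int :=
  let clean := st.1
  let inb := st.2.1
  let bi := st.2.2
  let stripped := PySem.Str.strip line
  if stripped = "test:" ∨ stripped = "doc:" then
    (clean ++ [PySem.Str.replace line stripped ("# " ++ stripped)], true,
      PySem.Str.len line - PySem.Str.len (PySem.Str.lstrip line))
  else if inb then
    let ci : Int := if PySem.Str.strip line ≠ "" then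
        PySem.Str.len line - PySem.Str.len (PySem.Str.lstrip line) else bi + 1
    if PySem.Str.strip line = "" ∨ ci > bi then
      (clean ++ [if PySem.Str.strip line ≠ "" then "    # " ++ PySem.Str.strip line else ""], inb, bi)
    else
      (clean ++ [line], false, bi)
  else
    (clean ++ [line], inb, bi)

def remove_pytestembed_blocks_py (source_code : String) : String :=
  let lines := (PySem.Str.split? source_code "\n").getD []
  PySem.Str.join "\n" (List.foldl pvStepA ([], false, 0) lines).1

-- ===== PORT B =====
-- Source B helpers: _is_header, _indent
def pvIsHeader (l : String) : Bool := PySem.Str.strip l == "test:" || PySem.Str.strip l == "doc:"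

def pvIndent (l : String) : Int := PySem.Str.len l - PySem.Str.len (PySem.Str.lstrip l)

-- the inner `while` of _body_flags: mark body lines of one block, from index j on
def pvMarkFrom (lines : List String) (ind : Int) (j : Nat) (flags : List Bool) : List Bool :=
  if h : j < lines.length then
    if !pvIsHeader lines[j] && (PySem.Str.strip lines[j] == "" || decide (ind < pvIndent lines[j])) then
      pvMarkFrom lines ind (j + 1) (flags.set j true)
    else flags
  else flags
termination_by lines.length - j

-- _body_flags: fold the per-header marking over the list of header indices
def pvFlags (lines : List String) : List Bool :=
  ((List.range lines.length).filter (fun i => pvIsHeader (lines.getD i ""))).foldl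
    (fun flags h => pvMarkFrom lines (pvIndent (lines.getD h "")) (h + 1) flags)
    (List.replicate lines.length false)

-- one iteration of the rendering `for line, f in zip(...)` loop
def pvRenderLine (line : String) (f : Bool) : String :=
  let s := PySem.Str.strip line
  if s = "test:" ∨ s = "doc:" then PySem.Str.replace line s ("# " ++ s)
  else if f then (if s = "" then "" else "    # " ++ s)
  else line

def remove_pytestembed_blocks_py_alt (source_code : String) : String :=
  let lines := (PySem.Str.split? source_code "\n").getD []
  PySem.Str.join "\n" ((lines.zip (pvFlags lines)).map (fun p => pvRenderLine p.1 p.2))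

-- ===== PRECONDITION & SPEC =====
def Spec_remove_pytestembed_blocks_py (source_code : String) (out : String) : Prop := out = remove_pytestembed_blocks_py_alt source_code
instance (source_code : String) (out : String) : Decidable (Spec_remove_pytestembed_blocks_py source_code out) := by unfold Spec_remove_pytestembed_blocks_py; infer_instance

-- ===== CLAIM (what is proved, stated in full; the proofs are below) =====
def Claim_equal_remove_pytestembed_blocks_py : Prop := ∀ (source_code : String), Dom_remove_pytestembed_blocks_py source_code → Spec_remove_pytestembed_blocks_py source_code (remove_pytestembed_blocks_py source_code)

-- ===== LEMMAS AND PROOFS =====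

-- proof-only helpers: a structural (suffix-local) description shared by both ports

def pvContB (ind : Int) (l : String) : Bool :=
  !pvIsHeader l && (PySem.Str.strip l == "" || decide (ind < pvIndent l))

-- true-prefix mask of one block's extent
def pvMask (ind : Int) : List String → List Bool
  | [] => []
  | l :: r => if pvContB ind l then true :: pvMask ind r else List.replicate (r.length + 1) false

def pvOr (a b : List Bool) : List Bool := List.zipWith (· || ·) a b

-- structural description of the flags array
def pvLocal : List String → List Bool
  | [] => []
  | l :: r => false :: (if pvIsHeader l then pvOr (pvMask (pvIndent l) r) (pvLocal r) else pvLocal r)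

def pvRender (lines : List String) (flags : List Bool) : List String :=
  (lines.zip flags).map (fun p => pvRenderLine p.1 p.2)

-- structural description of A's pass: plain mode / in-block mode
mutual
def pvOuter : List String → List String
  | [] => []
  | line :: rest =>
    let s := PySem.Str.strip line
    if s = "test:" ∨ s = "doc:" then
      PySem.Str.replace line s ("# " ++ s) ::
        pvInner (PySem.Str.len line - PySem.Str.len (PySem.Str.lstrip line)) rest
    else
      line :: pvOuter rest

def pvInner (indent : Int) : List String → List String
  | [] => []
  | line :: rest =>
    let s := PySem.Str.strip line
    if s = "test:" ∨ s = "doc:" then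
      PySem.Str.replace line s ("# " ++ s) ::
        pvInner (PySem.Str.len line - PySem.Str.len (PySem.Str.lstrip line)) rest
    else if s = "" then
      "" :: pvInner indent rest
    else if PySem.Str.len line - PySem.Str.len (PySem.Str.lstrip line) > indent then
      ("    # " ++ s) :: pvInner indent rest
    else
      line :: pvOuter rest
end

-- A's fold with in_block=false computes pvOuter, and with in_block=true computes pvInner
theorem pvFold_eq (lines : List String) :
    (∀ acc b, (List.foldl pvStepA (acc, false, b) lines).1 = acc ++ pvOuter lines) ∧
    (∀ acc ind, (List.foldl pvStepA (acc, true, ind) lines).1 = acc ++ pvInner ind lines) := by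
  induction lines with
  | nil => simp [pvOuter, pvInner]
  | cons line rest ih =>
    refine ⟨fun acc b => ?_, fun acc ind => ?_⟩
    · by_cases h1 : PySem.Str.strip line = "test:" ∨ PySem.Str.strip line = "doc:"
      · simp [pvStepA, pvOuter, h1, ih.2]
      · simp [pvStepA, pvOuter, h1, ih.1]
    · by_cases h1 : PySem.Str.strip line = "test:" ∨ PySem.Str.strip line = "doc:"
      · simp [pvStepA, pvInner, h1, ih.2]
      · by_cases h2 : PySem.Str.strip line = ""
        · simp [pvStepA, pvInner, h2, ih.2]
        · simp only [pvInner]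
          simp [h1, h2]
          split_ifs with h3
          · simp [pvStepA, h1, h2, h3, ih.2]
          · simp [pvStepA, h1, h2, h3, ih.1]

theorem pvIsHeader_iff (l : String) :
    pvIsHeader l = true ↔ (PySem.Str.strip l = "test:" ∨ PySem.Str.strip l = "doc:") := by
  simp [pvIsHeader]

theorem pvMask_length (ind : Int) (r : List String) : (pvMask ind r).length = r.length := by
  induction r with
  | nil => rfl
  | cons l r ih => by_cases h : pvContB ind l = true <;> simp [pvMask, h, ih]

theorem pvLocal_length (r : List String) : (pvLocal r).length = r.length := by
  induction r with
  | nil => rfl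
  | cons l r ih =>
    by_cases h : pvIsHeader l = true <;>
      simp [pvLocal, pvOr, h, ih, pvMask_length]

theorem pvOr_replicate_false (ys : List Bool) :
    pvOr (List.replicate ys.length false) ys = ys := by
  induction ys with
  | nil => rfl
  | cons y ys ih => simp [pvOr, List.replicate_succ] at ih ⊢; exact ih

theorem pvOr_set (p f : List Bool) (j : Nat) :
    (pvOr p f).set j true = pvOr p (f.set j true) := by
  induction p generalizing f j with
  | nil => simp [pvOr]
  | cons a p ih =>
    cases f with
    | nil => simp [pvOr]
    | cons b f =>
      cases j with
      | zero => simp [pvOr]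
      | succ j => simpa [pvOr] using ih f j

theorem pvMarkFrom_shift (l : String) (r : List String) (ind : Int) (j : Nat) (f : Bool)
    (fs : List Bool) :
    pvMarkFrom (l :: r) ind (j + 1) (f :: fs) = f :: pvMarkFrom r ind j fs := by
  fun_induction pvMarkFrom r ind j fs with
  | case1 j flags hj hc ih =>
    have hL : pvMarkFrom (l :: r) ind (j + 1) (f :: flags) =
        pvMarkFrom (l :: r) ind (j + 1 + 1) (f :: flags.set j true) := by
      conv_lhs => rw [pvMarkFrom]
      simp only [List.length_cons, List.getElem_cons_succ, List.set_cons_succ]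
      split
      · split
        · rfl
        · next hcc => exact absurd hc hcc
      · next hj2 => exact absurd (Nat.succ_lt_succ hj) hj2
    rw [hL]; exact ih
  | case2 j flags hj hc =>
    conv_lhs => rw [pvMarkFrom]
    simp only [List.length_cons, List.getElem_cons_succ, List.set_cons_succ]
    split
    · split
      · next hcc => exact absurd hcc hc
      · rfl
    · next hj2 => exact absurd (Nat.succ_lt_succ hj) hj2
  | case3 j flags hj =>
    conv_lhs => rw [pvMarkFrom]
    split
    · next hj2 => exact absurd (by simpa using hj2) hj
    · rfl

theorem pvMarkFrom_zero (r : List String) (ind : Int) (fs : List Bool)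
    (hlen : fs.length = r.length) :
    pvMarkFrom r ind 0 fs = pvOr (pvMask ind r) fs := by
  induction r generalizing fs with
  | nil =>
    rw [pvMarkFrom]
    cases fs with
    | nil => simp [pvMask, pvOr]
    | cons a b => simp at hlen
  | cons l r ih =>
    cases fs with
    | nil => simp at hlen
    | cons f fs =>
      simp at hlen
      by_cases hc : pvContB ind l = true
      · have hL : pvMarkFrom (l :: r) ind 0 (f :: fs) =
            pvMarkFrom (l :: r) ind 1 (true :: fs) := by
          conv_lhs => rw [pvMarkFrom]
          simp only [List.getElem_cons_zero, List.set_cons_zero]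
          split
          · split
            · rfl
            · next hcc => exact absurd hc hcc
          · next hj2 => exact absurd (by simp) hj2
        rw [hL, pvMarkFrom_shift, ih fs hlen]
        simp [pvMask, hc, pvOr]
      · have hL : pvMarkFrom (l :: r) ind 0 (f :: fs) = f :: fs := by
          conv_lhs => rw [pvMarkFrom]
          simp only [List.getElem_cons_zero, List.set_cons_zero]
          split
          · split
            · next hcc => exact absurd hcc hc
            · rfl
          · next hj2 => exact absurd (by simp) hj2
        have hcb : pvContB ind l = false := eq_false_of_ne_true hc
        have h1 : pvOr (List.replicate (r.length + 1) false) (f :: fs) = f :: fs := by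
          have := pvOr_replicate_false (f :: fs)
          simpa [hlen] using this
        simp [hL, pvMask, hcb, h1]

theorem pvMarkFrom_or (lines : List String) (ind : Int) (j : Nat) (p f : List Bool) :
    pvMarkFrom lines ind j (pvOr p f) = pvOr p (pvMarkFrom lines ind j f) := by
  fun_induction pvMarkFrom lines ind j f with
  | case1 j flags hj hc ih =>
    conv_lhs => rw [pvMarkFrom]
    split
    · rw [pvOr_set]; exact ih
    · next hj2 => exact absurd hj hj2
  | case2 j flags hj hc =>
    conv_lhs => rw [pvMarkFrom]
    split
    · rfl
    · next hj2 => exact absurd hj hj2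
  | case3 j flags hj =>
    conv_lhs => rw [pvMarkFrom]
    split
    · next hj2 => exact absurd hj2 hj
    · rfl

theorem pvFoldMark_or (lines : List String) (hs : List Nat) (p init : List Bool) :
    hs.foldl (fun flags h => pvMarkFrom lines (pvIndent (lines.getD h "")) (h + 1) flags)
        (pvOr p init) =
      pvOr p (hs.foldl (fun flags h => pvMarkFrom lines (pvIndent (lines.getD h "")) (h + 1) flags)
        init) := by
  induction hs generalizing init with
  | nil => rfl
  | cons h hs ih =>
    simp only [List.foldl_cons]
    rw [pvMarkFrom_or]
    exact ih _

theorem pvFoldMark_shift (l : String) (r : List String) (hs : List Nat) (f : Bool)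
    (fs : List Bool) :
    (hs.map (· + 1)).foldl
        (fun flags h => pvMarkFrom (l :: r) (pvIndent ((l :: r).getD h "")) (h + 1) flags)
        (f :: fs) =
      f :: hs.foldl (fun flags h => pvMarkFrom r (pvIndent (r.getD h "")) (h + 1) flags) fs := by
  induction hs generalizing fs with
  | nil => rfl
  | cons h hs ih =>
    simp only [List.map_cons, List.foldl_cons, List.getD_cons_succ]
    rw [pvMarkFrom_shift]
    exact ih _

theorem pvHeaderIdx_cons (l : String) (r : List String) :
    (List.range (l :: r).length).filter (fun i => pvIsHeader ((l :: r).getD i "")) =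
      (if pvIsHeader l then [0] else []) ++
        (((List.range r.length).filter (fun i => pvIsHeader (r.getD i ""))).map (· + 1)) := by
  simp [List.length_cons, List.range_succ_eq_map, List.filter_cons, List.filter_map]
  by_cases h : pvIsHeader l = true <;>
    simp [h, Function.comp_def]

theorem pvFlags_eq_local (lines : List String) : pvFlags lines = pvLocal lines := by
  induction lines with
  | nil => rfl
  | cons l r ih =>
    have htail : List.foldl (fun flags h => pvMarkFrom r (pvIndent (r.getD h "")) (h + 1) flags)
        (List.replicate r.length false)
        ((List.range r.length).filter (fun i => pvIsHeader (r.getD i ""))) = pvLocal r := ih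
    unfold pvFlags
    rw [pvHeaderIdx_cons]
    by_cases h : pvIsHeader l = true
    · rw [if_pos h]
      simp only [List.singleton_append, List.foldl_cons, List.getD_cons_zero,
        List.length_cons, List.replicate_succ]
      have hz : pvMarkFrom r (pvIndent l) 0 (List.replicate r.length false)
          = pvOr (pvMask (pvIndent l) r) (List.replicate r.length false) :=
        pvMarkFrom_zero r (pvIndent l) _ (by rw [List.length_replicate])
      rw [pvMarkFrom_shift l r (pvIndent l) 0, hz, pvFoldMark_shift, pvFoldMark_or, htail]
      simp [pvLocal, h]
    · rw [if_neg h]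
      simp only [List.nil_append, List.length_cons, List.replicate_succ]
      rw [pvFoldMark_shift, htail]
      simp [pvLocal, h]

theorem pvRender_cons (l : String) (r : List String) (f : Bool) (fs : List Bool) :
    pvRender (l :: r) (f :: fs) = pvRenderLine l f :: pvRender r fs := rfl

theorem pvRender_eq (lines : List String) :
    (pvRender lines (pvLocal lines) = pvOuter lines) ∧
    (∀ ind, pvRender lines (pvOr (pvMask ind lines) (pvLocal lines)) = pvInner ind lines) := by
  induction lines with
  | nil => simp [pvRender, pvLocal, pvMask, pvOuter, pvInner]
  | cons l r ih =>
    constructor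
    · by_cases h : pvIsHeader l = true
      · have h' := (pvIsHeader_iff l).mp h
        have hflag : pvLocal (l :: r) = false :: pvOr (pvMask (pvIndent l) r) (pvLocal r) := by
          simp [pvLocal, h]
        rw [hflag, pvRender_cons, ih.2 (pvIndent l)]
        simp [pvRenderLine, pvOuter, h', pvIndent]
      · have h' : ¬ (PySem.Str.strip l = "test:" ∨ PySem.Str.strip l = "doc:") :=
          fun hx => h ((pvIsHeader_iff l).mpr hx)
        have hflag : pvLocal (l :: r) = false :: pvLocal r := by simp [pvLocal, h]
        rw [hflag, pvRender_cons, ih.1]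
        simp [pvRenderLine, pvOuter, h']
    · intro ind
      by_cases h : pvIsHeader l = true
      · -- a header line: starts a new block also from inside a block
        have h' := (pvIsHeader_iff l).mp h
        have hcb : pvContB ind l = false := by simp [pvContB, h]
        have hflag : pvLocal (l :: r) = false :: pvOr (pvMask (pvIndent l) r) (pvLocal r) := by
          simp [pvLocal, h]
        have hrep : pvOr (List.replicate (pvLocal (l :: r)).length false) (pvLocal (l :: r)) =
            pvLocal (l :: r) := pvOr_replicate_false _
        rw [pvLocal_length] at hrep
        have hmask : pvMask ind (l :: r) = List.replicate (r.length + 1) false := by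
          simp [pvMask, hcb]
        rw [hmask, show r.length + 1 = (l :: r).length from rfl, hrep, hflag,
          pvRender_cons, ih.2 (pvIndent l)]
        conv_rhs => rw [pvInner]
        simp [pvRenderLine, h', pvIndent]
      · have hh : pvIsHeader l = false := eq_false_of_ne_true h
        have h' : ¬ (PySem.Str.strip l = "test:" ∨ PySem.Str.strip l = "doc:") :=
          fun hx => h ((pvIsHeader_iff l).mpr hx)
        have hlocal : pvLocal (l :: r) = false :: pvLocal r := by simp [pvLocal, hh]
        by_cases hc : pvContB ind l = true
        · -- still inside the block: blank line or deeper indentation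
          have hcp : PySem.Str.strip l = "" ∨ ind < pvIndent l := by
            have := hc; simp [pvContB, hh] at this; exact this
          have hmask : pvMask ind (l :: r) = true :: pvMask ind r := by simp [pvMask, hc]
          rw [hmask, hlocal]
          have hor : pvOr (true :: pvMask ind r) (false :: pvLocal r) =
              true :: pvOr (pvMask ind r) (pvLocal r) := by simp [pvOr]
          rw [hor, pvRender_cons, ih.2 ind]
          conv_rhs => rw [pvInner]
          by_cases hblank : PySem.Str.strip l = ""
          · simp [pvRenderLine, hblank]
          · have hdeep : ind < pvIndent l := by
              rcases hcp with hx | hx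
              · exact absurd hx hblank
              · exact hx
            have hdeep' := hdeep
            simp [pvIndent] at hdeep'
            simp [pvRenderLine, h', hblank, hdeep']
        · -- block exit: non-blank line at the block indent or less, kept verbatim
          have hcb : pvContB ind l = false := eq_false_of_ne_true hc
          have hcp : ¬ PySem.Str.strip l = "" ∧ pvIndent l ≤ ind := by
            simpa [pvContB, hh] using hcb
          have hmask : pvMask ind (l :: r) = List.replicate (r.length + 1) false := by
            simp [pvMask, hcb]
          have hrep : pvOr (List.replicate (pvLocal (l :: r)).length false) (pvLocal (l :: r)) =
              pvLocal (l :: r) := pvOr_replicate_false _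
          rw [pvLocal_length] at hrep
          rw [hmask, show r.length + 1 = (l :: r).length from rfl, hrep, hlocal,
            pvRender_cons, ih.1]
          conv_rhs => rw [pvInner]
          have hle := hcp.2
          simp [pvIndent] at hle
          simp [pvRenderLine, h', hcp.1]
          intro hlt
          exfalso
          omega

-- ===== VERDICT (by name: the statement is the Claim_ definition above) =====
theorem remove_pytestembed_blocks_py_spec : Claim_equal_remove_pytestembed_blocks_py := by
  intro source_code _
  unfold Spec_remove_pytestembed_blocks_py remove_pytestembed_blocks_py remove_pytestembed_blocks_py_alt
  simp only [pvFlags_eq_local]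
  have h1 := (pvFold_eq ((PySem.Str.split? source_code "\n").getD [])).1 [] 0
  have h2 := (pvRender_eq ((PySem.Str.split? source_code "\n").getD [])).1
  unfold pvRender at h2
  simp only [List.nil_append] at h1
  rw [h1, ← h2]
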